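-- pv_equiv track=rewrite | github.com/Ecustkiller/StockAnal_Sys | claw/strategies/群主多策略实盘框架_效率动量版.py | split_quantity_for_orders
-- ===== SOURCE A (Python) =====
-- def split_quantity_for_orders(current_amount, max_order_amount):
--     """
--     将数量拆分为多个部分，确保每部分（除最后一部分外）都是100的整数倍且不超过最大下单数量
--
--     Args:
--         current_amount: 待拆分数量
--         max_order_amount: 最大下单数量
--
--     Returns:
--         list: 包含每笔订单数量的列表
--     """
--     current_amount = int(current_amount)
--     abs_amount = abs(current_amount)
--     if abs_amount == 0:
--         return []
--
--     sign = 1 if current_amount > 0 else -1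
--
--     # 确保单笔最大数量是100的倍数，最小为100
--     safe_max_amount = (max_order_amount // 100) * 100
--     if safe_max_amount == 0:
--         safe_max_amount = 100
--
--     order_amounts = []
--     remaining = abs_amount
--
--     # 贪婪拆分：尽可能使用 safe_max_amount，确保除最后一笔外都是100的整数倍且不超限
--     while remaining > safe_max_amount:
--         order_amounts.append(sign * safe_max_amount)
--         remaining -= safe_max_amount
--
--     # 最后一笔处理剩余数量
--     if remaining > 0:
--         # 最后一笔订单。注意：对于清仓，remaining 可能包含碎股；对于减仓，外层逻辑已确保其为100的倍数。
--         order_amounts.append(sign * remaining)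
--
--     return order_amounts
-- ===== SOURCE B (Python) =====
-- def split_quantity_for_orders(current_amount, max_order_amount):
--     current_amount = int(current_amount)
--     abs_amount = abs(current_amount)
--     if abs_amount == 0:
--         return []
--     sign = 1 if current_amount > 0 else -1
--     safe_max_amount = (max_order_amount // 100) * 100 or 100
--     q, r = divmod(abs_amount, safe_max_amount)
--     chunks = [sign * safe_max_amount] * q
--     return chunks if r == 0 else chunks + [sign * r]
-- ===== Notes on version B (the rewrite author's own statement) =====
-- stated objective: simpler
-- what changed: Replaced the greedy while-loop that subtracts safe_max_amount repeatedly with a single divmod and arithmetic list construction (q full chunks plus an optional remainder chunk).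
import Mathlib
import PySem

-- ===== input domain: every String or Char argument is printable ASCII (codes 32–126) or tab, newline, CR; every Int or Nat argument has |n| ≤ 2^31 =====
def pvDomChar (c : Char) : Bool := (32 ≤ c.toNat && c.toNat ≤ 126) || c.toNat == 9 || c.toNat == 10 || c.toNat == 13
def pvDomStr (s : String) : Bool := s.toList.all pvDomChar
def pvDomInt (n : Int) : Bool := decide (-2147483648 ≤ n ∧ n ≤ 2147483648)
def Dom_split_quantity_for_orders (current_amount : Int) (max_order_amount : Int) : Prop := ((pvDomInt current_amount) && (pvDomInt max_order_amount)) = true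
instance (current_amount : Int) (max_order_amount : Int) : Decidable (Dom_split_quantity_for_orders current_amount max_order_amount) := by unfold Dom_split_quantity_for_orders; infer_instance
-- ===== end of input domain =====

-- B replaces A's greedy subtraction loop with one divmod and arithmetic list construction (simpler).

-- ===== PORT A =====
-- A's while loop, fuel-bounded for totality (fuel suffices on every admitted input);
-- the trailing 'if remaining > 0: append' is the base case of the recursion.
def pvLoopA (fuel : Nat) (sign safe remaining : Int) : List Int :=
  match fuel with
  | 0 => []
  | f + 1 =>
    if remaining > safe then
      sign * safe :: pvLoopA f sign safe (remaining - safe)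
    else if remaining > 0 then [sign * remaining]
    else []

def split_quantity_for_orders (current_amount : Int) (max_order_amount : Int) : List Int :=
  let abs_amount := |current_amount|
  if abs_amount = 0 then []
  else
    let sign : Int := if current_amount > 0 then 1 else -1
    let safe0 := (PySem.Int.floordiv max_order_amount 100) * 100
    let safe_max_amount := if safe0 = 0 then 100 else safe0
    pvLoopA (abs_amount.toNat + 1) sign safe_max_amount abs_amount

-- ===== PORT B =====
def split_quantity_for_orders_alt (current_amount : Int) (max_order_amount : Int) : List Int :=
  let abs_amount := |current_amount|
  if abs_amount = 0 then []
  else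
    let sign : Int := if current_amount > 0 then 1 else -1
    let safe0 := (PySem.Int.floordiv max_order_amount 100) * 100
    let safe_max_amount := if safe0 = 0 then 100 else safe0
    let q := PySem.Int.floordiv abs_amount safe_max_amount
    let r := PySem.Int.mod abs_amount safe_max_amount
    let chunks := List.replicate q.toNat (sign * safe_max_amount)
    if r = 0 then chunks else chunks ++ [sign * r]

-- ===== PRECONDITION & SPEC =====
-- Pre_ excludes inputs where A never returns: for current_amount ≠ 0 and max_order_amount < 0,
-- safe_max_amount is negative and A's while loop runs forever (divergence, not a value).
def Pre_split_quantity_for_orders (current_amount : Int) (max_order_amount : Int) : Prop :=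
  current_amount = 0 ∨ 0 ≤ max_order_amount
instance (current_amount : Int) (max_order_amount : Int) : Decidable (Pre_split_quantity_for_orders current_amount max_order_amount) := by unfold Pre_split_quantity_for_orders; infer_instance

def pvWitness_split_quantity_for_orders : Int × Int := (250, 120)

def Spec_split_quantity_for_orders (current_amount : Int) (max_order_amount : Int) (out : List Int) : Prop := out = split_quantity_for_orders_alt current_amount max_order_amount
instance (current_amount : Int) (max_order_amount : Int) (out : List Int) : Decidable (Spec_split_quantity_for_orders current_amount max_order_amount out) := by unfold Spec_split_quantity_for_orders; infer_instance

-- ===== CLAIM (what is proved, stated in full; the proofs are below) =====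
def Claim_equal_split_quantity_for_orders : Prop := ∀ (current_amount : Int) (max_order_amount : Int), Dom_split_quantity_for_orders current_amount max_order_amount → Pre_split_quantity_for_orders current_amount max_order_amount → Spec_split_quantity_for_orders current_amount max_order_amount (split_quantity_for_orders current_amount max_order_amount)

-- ===== LEMMAS AND PROOFS =====

-- A's loop computes exactly B's divmod-based list, for a positive chunk size.
theorem pvLoopA_eq (fuel : Nat) (sign safe : Int) (hsafe : 0 < safe) :
    ∀ remaining : Int, 0 < remaining → remaining.toNat ≤ fuel →
      pvLoopA fuel sign safe remaining =
        List.replicate (remaining / safe).toNat (sign * safe) ++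
          (if remaining % safe = 0 then [] else [sign * (remaining % safe)]) := by
  induction fuel with
  | zero => intro r hr hf; omega
  | succ f ih =>
    intro r hr hf
    by_cases h : r > safe
    · have h1 : 0 < r - safe := by omega
      have h2 : (r - safe).toNat ≤ f := by omega
      have hq : r / safe = (r - safe) / safe + 1 := by
        have := Int.add_mul_ediv_right (r - safe) 1 (by omega : safe ≠ 0)
        simpa [sub_add_cancel] using this
      have hm : r % safe = (r - safe) % safe := (Int.sub_emod_right r safe).symm
      have hq0 : 0 ≤ (r - safe) / safe := Int.ediv_nonneg (by omega) (by omega)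
      have hqn : (r / safe).toNat = ((r - safe) / safe).toNat + 1 := by
        rw [hq]; omega
      rw [pvLoopA, if_pos h, ih (r - safe) h1 h2, hm, hqn, List.replicate_succ]
      simp
    · rw [pvLoopA, if_neg h, if_pos hr]
      by_cases he : r = safe
      · subst he
        rw [Int.ediv_self (by omega), Int.emod_self]
        simp
      · have hlt : r < safe := by omega
        rw [Int.ediv_eq_zero_of_lt (by omega) hlt, Int.emod_eq_of_lt (by omega) hlt]
        have : r ≠ 0 := by omega
        simp [this]

-- ===== VERDICT (by name: the statement is the Claim_ definition above) =====
theorem split_quantity_for_orders_spec : Claim_equal_split_quantity_for_orders := by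
  intro c m _ hpre
  unfold Spec_split_quantity_for_orders split_quantity_for_orders split_quantity_for_orders_alt
  by_cases hc : |c| = 0
  · simp [hc]
  · have hc0 : c ≠ 0 := fun h => hc (by simp [h])
    have hm : 0 ≤ m := by
      rcases hpre with h | h
      · exact absurd h hc0
      · exact h
    simp only [if_neg hc]
    set sign : Int := if c > 0 then 1 else -1 with hsign
    set safe0 := (PySem.Int.floordiv m 100) * 100 with hsafe0
    set safe := if safe0 = 0 then 100 else safe0 with hsafe
    have hsafe0nn : 0 ≤ safe0 := by
      have h100 : 0 ≤ PySem.Int.floordiv m 100 := by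
        rw [PySem.Int.floordiv_eq_ediv_of_pos (by omega)]
        exact Int.ediv_nonneg hm (by omega)
      positivity
    have hsafep : 0 < safe := by
      rw [hsafe]
      split_ifs with h
      · omega
      · omega
    have habs : 0 < |c| := by positivity
    rw [pvLoopA_eq (|c|.toNat + 1) sign safe hsafep |c| habs (by omega)]
    rw [PySem.Int.floordiv_eq_ediv_of_pos hsafep, PySem.Int.mod_eq_emod_of_pos hsafep]
    by_cases hr : |c| % safe = 0
    · simp [hr]
    · simp [hr]
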